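-- pv_equiv track=rewrite | github.com/Jony-GydeRnE/locality-proof | computations/step4_laurent_block_analysis/n8/scripts/cascade_kill_n8.py | is_triangulation
-- ===== SOURCE A (Python) =====
-- def is_triangulation(ms_list, n):
--     """
--     Test whether the multiset is a triangulation of the n-gon.
--
--     LOGIC:  triangulations of an n-gon have exactly n-3 distinct,
--             pairwise non-crossing chords.  Two chords (a, b) and (c, d)
--             cross iff (in cyclic order around the polygon) one of c, d
--             is strictly between a and b and the other is not.  We check
--             distinctness (multiset = set of size n-3) and pairwise
--             non-crossing.
--
--     PHYSICS:  triangulation coefficients in B are exactly the Feynman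
--               diagram coefficients of A_n^tree.  We exclude them from the
--               survivor pool because Theorem 1 of triangulation_layer0.tex
--               shows they are NEVER step-1 killable, so they never appear
--               in a step-1 survivor list anyway -- but the explicit check
--               is a sanity guard.
--     """
--     if len(set(ms_list)) != n - 3:
--         return False  # repeated chord => double pole, not a triangulation
--     chords = list(set(ms_list))
--     for i in range(len(chords)):
--         for j in range(i + 1, len(chords)):
--             a, b = chords[i]
--             c, d = chords[j]
--             # If the chords share an endpoint, they cannot cross.
--             # (Crossing requires four distinct vertices.)
--             if a == c or a == d or b == c or b == d:
--                 continue
--             # Crossing test: exactly one of c, d strictly between a and b.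
--             # With distinct endpoints and a<b, c<d, this is the standard
--             # convex-polygon chord-crossing condition.
--             between_c = (a < c < b)
--             between_d = (a < d < b)
--             if between_c != between_d:
--                 return False
--     return True
-- ===== SOURCE B (Python) =====
-- def is_triangulation(ms_list, n):
--     """Same test, by a different algorithm: sort the deduplicated chords by
--     (left endpoint asc, right endpoint desc) and verify the non-crossing
--     (laminar) property with one stack sweep instead of a pairwise loop."""
--     chords = list(set(ms_list))
--     if len(chords) != n - 3:
--         return False
--     chords.sort(key=lambda c: (c[0], -c[1]))
--     stack = []
--     for a, b in chords:
--         while stack and stack[-1] <= a: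
--             stack.pop()
--         if stack and stack[-1] < b:
--             return False
--         stack.append(b)
--     return True
-- ===== Notes on version B (the rewrite author's own statement) =====
-- stated objective: alternative
-- what changed: Replaces A's all-pairs chord-crossing loop with a sort by (left asc, right desc) followed by a single stack sweep that checks the laminar (non-crossing) property.
-- outside the precondition, e.g. on is_triangulation([(0, 2), (4, 1)], 5): A returns False, B returns True; on is_triangulation([(1, 2, 3)], 4): A returns True, B raises ValueError
import Mathlib
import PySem

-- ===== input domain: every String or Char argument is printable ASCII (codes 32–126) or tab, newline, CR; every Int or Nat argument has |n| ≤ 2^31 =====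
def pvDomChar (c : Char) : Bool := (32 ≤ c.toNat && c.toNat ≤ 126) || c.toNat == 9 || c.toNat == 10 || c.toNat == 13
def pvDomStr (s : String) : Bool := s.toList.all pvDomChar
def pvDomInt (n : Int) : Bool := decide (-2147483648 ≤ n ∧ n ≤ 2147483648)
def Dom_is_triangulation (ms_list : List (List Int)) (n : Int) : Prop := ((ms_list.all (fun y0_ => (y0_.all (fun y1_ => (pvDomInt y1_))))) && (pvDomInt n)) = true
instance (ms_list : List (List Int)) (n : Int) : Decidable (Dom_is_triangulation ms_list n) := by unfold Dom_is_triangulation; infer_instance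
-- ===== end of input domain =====

-- B replaces A's all-pairs chord-crossing loop by sort + one stack sweep (laminar
-- check); proved equal to A on Pre_ (pair loop only reached with ≤-sorted 2-chords).


-- ===== PORT A =====
-- tuple unpack 'a, b = chord' read as components (on length-2 chords, the only ones
-- the loops run on inside Pre_, this is exact)
def pvFst (c : List Int) : Int := c.getD 0 0
def pvSnd (c : List Int) : Int := c.getD 1 0

-- body of A's inner j-loop for the pair chords[i] = p, chords[j] = q:
-- true = continue, false = `return False`
def pvCheckPairA (p q : List Int) : Bool :=
  let a := pvFst p
  let b := pvSnd p
  let c := pvFst q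
  let d := pvSnd q
  if a = c ∨ a = d ∨ b = c ∨ b = d then true
  else decide (a < c ∧ c < b) == decide (a < d ∧ d < b)

-- inner loop: j over the suffix after position i
def pvInnerA (p : List Int) : List (List Int) → Bool
  | [] => true
  | q :: rest => pvCheckPairA p q && pvInnerA p rest

-- outer loop: i over all positions
def pvOuterA : List (List Int) → Bool
  | [] => true
  | p :: rest => pvInnerA p rest && pvOuterA rest

def is_triangulation (ms_list : List (List Int)) (n : Int) : Bool :=
  if (PySem.Set.len (PySem.Set.ofList ms_list) : Int) ≠ n - 3 then false
  else pvOuterA (PySem.Set.ofList ms_list)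

-- ===== PORT B =====
-- `while stack and stack[-1] <= a: stack.pop()`  (stack head = Python's stack[-1])
def pvPopLE (a : Int) : List Int → List Int
  | [] => []
  | t :: st => if t ≤ a then pvPopLE a st else t :: st

-- `for a, b in chords: … pop … ; if stack and stack[-1] < b: return False ; push b`
def pvSweep : List (List Int) → List Int → Bool
  | [], _ => true
  | c :: rest, stack =>
    match pvPopLE (pvFst c) stack with
    | [] => pvSweep rest [pvSnd c]
    | t :: st' => if t < pvSnd c then false else pvSweep rest (pvSnd c :: t :: st')

def is_triangulation_alt (ms_list : List (List Int)) (n : Int) : Bool :=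
  let chords := PySem.Set.ofList ms_list
  if (PySem.Set.len chords : Int) ≠ n - 3 then false
  else pvSweep (PySem.List.sorted2 chords pvFst (fun c => -(pvSnd c))) []

-- ===== PRECONDITION & SPEC =====
-- Pre_ excludes only inputs on which the pair loop is reached (distinct-chord count
-- = n−3) with a chord that is not a ≤-sorted length-2 pair: on a malformed chord A
-- raises ValueError (or happens to return first), and on a reversed chord (a > b)
-- A's answer depends on Python's set iteration order (hash order), which is accidental.
def Pre_is_triangulation (ms_list : List (List Int)) (n : Int) : Prop :=
  (PySem.Set.len (PySem.Set.ofList ms_list) : Int) = n - 3 →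
    ∀ c ∈ ms_list, c.length = 2 ∧ pvFst c ≤ pvSnd c
instance (ms_list : List (List Int)) (n : Int) : Decidable (Pre_is_triangulation ms_list n) := by
  unfold Pre_is_triangulation; infer_instance

def pvWitness_is_triangulation : List (List Int) × Int := ([[0, 2]], 4)

def Spec_is_triangulation (ms_list : List (List Int)) (n : Int) (out : Bool) : Prop := out = is_triangulation_alt ms_list n
instance (ms_list : List (List Int)) (n : Int) (out : Bool) : Decidable (Spec_is_triangulation ms_list n out) := by unfold Spec_is_triangulation; infer_instance

-- ===== CLAIM (what is proved, stated in full; the proofs are below) =====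
def Claim_equal_is_triangulation : Prop := ∀ (ms_list : List (List Int)) (n : Int), Dom_is_triangulation ms_list n → Pre_is_triangulation ms_list n → Spec_is_triangulation ms_list n (is_triangulation ms_list n)

-- ===== LEMMAS AND PROOFS =====

-- the (symmetric) strict chord-crossing relation both programs decide
def pvCross (p q : List Int) : Prop :=
  (pvFst p < pvFst q ∧ pvFst q < pvSnd p ∧ pvSnd p < pvSnd q) ∨
  (pvFst q < pvFst p ∧ pvFst p < pvSnd q ∧ pvSnd q < pvSnd p)

-- B's sort order: left endpoint ascending, ties by right endpoint descending
def pvKeyLE (p q : List Int) : Prop :=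
  pvFst p < pvFst q ∨ (pvFst p = pvFst q ∧ pvSnd q ≤ pvSnd p)

-- ---- A side ----

lemma pvCheckPairA_iff (p q : List Int) (hp : pvFst p ≤ pvSnd p) (hq : pvFst q ≤ pvSnd q) :
    pvCheckPairA p q = true ↔ ¬ pvCross p q := by
  simp only [pvCheckPairA, pvCross]
  split_ifs with h
  · simp only [true_iff]; omega
  · simp only [beq_iff_eq, decide_eq_decide]; omega

lemma pvInnerA_iff (p : List Int) (l : List (List Int)) :
    pvInnerA p l = true ↔ ∀ q ∈ l, pvCheckPairA p q = true := by
  induction l with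
  | nil => simp [pvInnerA]
  | cons q rest ih => simp [pvInnerA, ih]

lemma pvOuterA_iff (l : List (List Int)) :
    pvOuterA l = true ↔ l.Pairwise (fun p q => pvCheckPairA p q = true) := by
  induction l with
  | nil => simp [pvOuterA]
  | cons p rest ih => simp [pvOuterA, List.pairwise_cons, pvInnerA_iff, ih]

-- ---- B side: the stack ----

lemma pvPopLE_subset (a : Int) : ∀ {S : List Int} {t : Int}, t ∈ pvPopLE a S → t ∈ S := by
  intro S
  induction S with
  | nil => intro t h; simp [pvPopLE] at h
  | cons u st ih =>
    intro t h
    by_cases hu : u ≤ a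
    · simp only [pvPopLE, if_pos hu] at h; exact List.mem_cons_of_mem _ (ih h)
    · simpa only [pvPopLE, if_neg hu] using h

lemma pvPopLE_pos (a : Int) {S : List Int} (hS : S.Pairwise (· ≤ ·)) :
    ∀ t ∈ pvPopLE a S, a < t := by
  induction S with
  | nil => intro t h; simp [pvPopLE] at h
  | cons u st ih =>
    obtain ⟨hu1, hu2⟩ := List.pairwise_cons.1 hS
    intro t h
    by_cases hu : u ≤ a
    · simp only [pvPopLE, if_pos hu] at h; exact ih hu2 t h
    · simp only [pvPopLE, if_neg hu] at h
      rcases List.mem_cons.1 h with rfl | h'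
      · omega
      · have := hu1 t h'; omega

lemma pvMem_popLE (a : Int) {S : List Int} {t : Int} (ht : t ∈ S) (h : a < t) :
    t ∈ pvPopLE a S := by
  induction S with
  | nil => simp at ht
  | cons u st ih =>
    by_cases hu : u ≤ a
    · simp only [pvPopLE, if_pos hu]
      rcases List.mem_cons.1 ht with rfl | ht'
      · omega
      · exact ih ht'
    · simpa only [pvPopLE, if_neg hu] using ht

lemma pvPopLE_pairwise (a : Int) {S : List Int} (hS : S.Pairwise (· ≤ ·)) :
    (pvPopLE a S).Pairwise (· ≤ ·) := by
  induction S with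
  | nil => simp [pvPopLE]
  | cons u st ih =>
    obtain ⟨_, hu2⟩ := List.pairwise_cons.1 hS
    by_cases hu : u ≤ a
    · simpa only [pvPopLE, if_pos hu] using ih hu2
    · simpa only [pvPopLE, if_neg hu] using hS

-- the iff transferred across one push of pvSnd c onto the popped stack
lemma pvPush_iff (c : List Int) (rest : List (List Int)) (S : List Int)
    (hhead : ∀ p ∈ rest, pvKeyLE c p)
    (hb : ∀ t ∈ pvPopLE (pvFst c) S, pvSnd c ≤ t) :
    (rest.Pairwise (fun p q => ¬ pvCross p q) ∧
      ∀ p ∈ rest, ∀ t ∈ pvSnd c :: pvPopLE (pvFst c) S, ¬ (pvFst p < t ∧ t < pvSnd p)) ↔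
    ((c :: rest).Pairwise (fun p q => ¬ pvCross p q) ∧
      ∀ p ∈ c :: rest, ∀ t ∈ S, ¬ (pvFst p < t ∧ t < pvSnd p)) := by
  constructor
  · rintro ⟨hpw, hstk⟩
    refine ⟨List.pairwise_cons.2 ⟨?_, hpw⟩, ?_⟩
    · intro p hp hcr
      have hk := hhead p hp
      have h3 : pvFst p < pvSnd c ∧ pvSnd c < pvSnd p := by
        unfold pvCross pvKeyLE at *; omega
      exact hstk p hp (pvSnd c) (List.mem_cons_self) ⟨h3.1, h3.2⟩
    · intro p hp t ht
      rcases List.mem_cons.1 hp with rfl | hp'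
      · rintro ⟨h1, h2⟩
        have hmem := pvMem_popLE (pvFst p) ht h1
        have := hb t hmem
        omega
      · by_cases hta : t ≤ pvFst c
        · have hk := hhead p hp'
          unfold pvKeyLE at hk; omega
        · have hmem := pvMem_popLE (pvFst c) ht (by omega)
          exact hstk p hp' t (List.mem_cons_of_mem _ hmem)
  · rintro ⟨hpw, hstk⟩
    obtain ⟨hc, hpw'⟩ := List.pairwise_cons.1 hpw
    refine ⟨hpw', ?_⟩
    intro p hp t ht
    rcases List.mem_cons.1 ht with rfl | ht'
    · have h1 := hc p hp
      have h2 := hhead p hp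
      unfold pvCross pvKeyLE at *; omega
    · exact hstk p (List.mem_cons_of_mem _ hp) t (pvPopLE_subset _ ht')

lemma pvSweep_iff : ∀ (l : List (List Int)) (S : List Int),
    S.Pairwise (· ≤ ·) → l.Pairwise pvKeyLE →
    (pvSweep l S = true ↔
      (l.Pairwise (fun p q => ¬ pvCross p q) ∧
        ∀ p ∈ l, ∀ t ∈ S, ¬ (pvFst p < t ∧ t < pvSnd p))) := by
  intro l
  induction l with
  | nil => intro S hS _; simp [pvSweep]
  | cons c rest ih =>
    intro S hS hl
    obtain ⟨hhead, htail⟩ := List.pairwise_cons.1 hl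
    cases hst : pvPopLE (pvFst c) S with
    | nil =>
      have hb : ∀ t ∈ pvPopLE (pvFst c) S, pvSnd c ≤ t := by rw [hst]; simp
      rw [show pvSweep (c :: rest) S = pvSweep rest [pvSnd c] by
        simp only [pvSweep, hst]]
      rw [ih [pvSnd c] (by simp) htail]
      simpa only [hst] using pvPush_iff c rest S hhead hb
    | cons t st' =>
      have hpwPop : (pvPopLE (pvFst c) S).Pairwise (· ≤ ·) := pvPopLE_pairwise _ hS
      by_cases htb : t < pvSnd c
      · rw [show pvSweep (c :: rest) S = false by
          simp only [pvSweep, hst, if_pos htb]]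
        simp only [Bool.false_eq_true, false_iff]
        rintro ⟨-, h2⟩
        have htS : t ∈ S := pvPopLE_subset _ (by rw [hst]; exact List.mem_cons_self)
        have hat : pvFst c < t := pvPopLE_pos _ hS t (by rw [hst]; exact List.mem_cons_self)
        exact h2 c List.mem_cons_self t htS ⟨hat, htb⟩
      · have hb : ∀ u ∈ pvPopLE (pvFst c) S, pvSnd c ≤ u := by
          rw [hst]; rw [hst] at hpwPop
          obtain ⟨h1, _⟩ := List.pairwise_cons.1 hpwPop
          intro u hu
          rcases List.mem_cons.1 hu with rfl | hu'
          · omega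
          · have := h1 u hu'; omega
        rw [show pvSweep (c :: rest) S = pvSweep rest (pvSnd c :: t :: st') by
          simp only [pvSweep, hst, if_neg htb]]
        have hnewPw : (pvSnd c :: t :: st').Pairwise (· ≤ ·) := by
          rw [hst] at hpwPop hb
          exact List.pairwise_cons.2 ⟨fun u hu => hb u hu, hpwPop⟩
        rw [ih (pvSnd c :: t :: st') hnewPw htail]
        simpa only [hst] using pvPush_iff c rest S hhead hb

-- ---- B side: the sort ----

def pvBefore (p q : List Int) : Bool :=
  decide (pvFst p < pvFst q) || (!decide (pvFst q < pvFst p) && decide (-(pvSnd p) < -(pvSnd q)))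

lemma pvInsertBy_pairwise (x : List Int) (ys : List (List Int))
    (h : ys.Pairwise (fun p q => pvBefore q p = false)) :
    (PySem.List.insertBy pvBefore x ys).Pairwise (fun p q => pvBefore q p = false) := by
  induction ys with
  | nil => simp [PySem.List.insertBy]
  | cons y ys ih =>
    obtain ⟨hy, hys⟩ := List.pairwise_cons.1 h
    by_cases hxy : pvBefore x y = true
    · rw [show PySem.List.insertBy pvBefore x (y :: ys) = x :: y :: ys by
        simp [PySem.List.insertBy, hxy]]
      refine List.pairwise_cons.2 ⟨?_, h⟩
      intro z hz
      rcases List.mem_cons.1 hz with rfl | hz'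
      · simp only [pvBefore] at hxy ⊢; simp at hxy ⊢; omega
      · have := hy z hz'
        simp only [pvBefore] at hxy this ⊢
        simp at hxy this ⊢; omega
    · rw [show PySem.List.insertBy pvBefore x (y :: ys) = y :: PySem.List.insertBy pvBefore x ys by
        simp [PySem.List.insertBy, hxy]]
      refine List.pairwise_cons.2 ⟨?_, ih hys⟩
      intro z hz
      rcases (PySem.List.mem_insertBy _ _ _ _).1 hz with rfl | hz'
      · simpa using hxy
      · exact hy z hz'

lemma pvFoldl_insertBy_pairwise (l : List (List Int)) :
    ∀ acc : List (List Int), acc.Pairwise (fun p q => pvBefore q p = false) →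
    (l.foldl (fun acc x => PySem.List.insertBy pvBefore x acc) acc).Pairwise
      (fun p q => pvBefore q p = false) := by
  induction l with
  | nil => intro acc h; simpa using h
  | cons x l ih =>
    intro acc h
    exact ih _ (pvInsertBy_pairwise x acc h)

lemma pvSorted2_pairwise (l : List (List Int)) :
    (PySem.List.sorted2 l pvFst (fun c => -(pvSnd c))).Pairwise pvKeyLE := by
  have hfold : PySem.List.sorted2 l pvFst (fun c => -(pvSnd c)) =
      l.foldl (fun acc x => PySem.List.insertBy pvBefore x acc) [] := rfl
  rw [hfold]
  refine List.Pairwise.imp ?_ (pvFoldl_insertBy_pairwise l [] (by simp))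
  intro p q h
  simp only [pvBefore] at h
  simp at h
  unfold pvKeyLE
  omega

-- ---- assembly ----

lemma pvCross_symm {p q : List Int} (h : pvCross p q) : pvCross q p := by
  unfold pvCross at *; omega

theorem pvMain (ms_list : List (List Int)) (n : Int)
    (hpre : Pre_is_triangulation ms_list n) :
    is_triangulation ms_list n = is_triangulation_alt ms_list n := by
  by_cases hc : (PySem.Set.len (PySem.Set.ofList ms_list) : Int) = n - 3
  · have hgood : ∀ c ∈ PySem.Set.ofList ms_list, pvFst c ≤ pvSnd c := fun c hcmem =>
      (hpre hc c ((PySem.Set.mem_ofList ms_list c).1 hcmem)).2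
    unfold is_triangulation is_triangulation_alt
    simp only [if_neg (not_not_intro hc)]
    set L := PySem.Set.ofList ms_list with hL
    set SL := PySem.List.sorted2 L pvFst (fun c => -(pvSnd c)) with hSL
    have hperm : SL.Perm L := PySem.List.sorted2_perm L pvFst (fun c => -(pvSnd c)) false
    rw [Bool.eq_iff_iff]
    rw [pvOuterA_iff]
    rw [pvSweep_iff SL [] (by simp) (pvSorted2_pairwise L)]
    have hBside : SL.Pairwise (fun p q => ¬ pvCross p q) ↔
        L.Pairwise (fun p q => ¬ pvCross p q) :=
      (List.Perm.pairwise_iff (fun h h' => h (pvCross_symm h')) hperm)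
    have hAside : L.Pairwise (fun p q => pvCheckPairA p q = true) ↔
        L.Pairwise (fun p q => ¬ pvCross p q) :=
      List.Pairwise.iff_of_mem (fun {a b} ha hb =>
        pvCheckPairA_iff a b (hgood a ha) (hgood b hb))
    simp only [List.not_mem_nil, false_implies, implies_true, and_true]
    rw [hAside, hBside]
  · unfold is_triangulation is_triangulation_alt
    simp only [if_pos hc]

-- ===== VERDICT (by name: the statement is the Claim_ definition above) =====
theorem is_triangulation_spec : Claim_equal_is_triangulation := by
  intro ms_list n _ hpre
  unfold Spec_is_triangulation
  exact pvMain ms_list n hpre
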